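-- pv_equiv track=rewrite | github.com/MarcosVeniciu/TP-Sistemas-Distribuido | TP4/vomaria/Codigo/Cliente/modulos antigos/buscar_perfil_amigo.py | get_descricao
-- ===== SOURCE A (Python) =====
-- def get_descricao(resposta):
--     descricao = ""
--     for caractere in resposta:
--         if caractere != "|":
--             descricao += caractere
--         else:
--             break
--
--     descricao = formatar_descricao(descricao)
--     return descricao
--
-- def formatar_descricao(descricao):
--     linha = ""
--     for i in range(len(descricao)):
--         if i == 65 or i == 130 or i == 195:
--            linha +=  "\n" + descricao[i]  if descricao[i] != " " else "\n"
--         else: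
--             linha += descricao[i]
--
--     return linha
-- ===== SOURCE B (Python) =====
-- def get_descricao(resposta):
--     descricao = resposta.split('|', 1)[0]
--     pieces = []
--     prev = 0
--     for pos in (65, 130, 195):
--         if pos < len(descricao):
--             pieces.append(descricao[prev:pos])
--             pieces.append('\n')
--             prev = pos + 1 if descricao[pos] == ' ' else pos
--     pieces.append(descricao[prev:])
--     return ''.join(pieces)
-- ===== Notes on version B (the rewrite author's own statement) =====
-- stated objective: faster
-- what changed: A scans char-by-char (a break-loop collecting the prefix before the delimiter, then a per-index loop testing i==65/130/195 on every character with string +=); B takes the prefix with split, then builds the result from three slices keyed on the fixed break positions and joins them.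
import Mathlib
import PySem

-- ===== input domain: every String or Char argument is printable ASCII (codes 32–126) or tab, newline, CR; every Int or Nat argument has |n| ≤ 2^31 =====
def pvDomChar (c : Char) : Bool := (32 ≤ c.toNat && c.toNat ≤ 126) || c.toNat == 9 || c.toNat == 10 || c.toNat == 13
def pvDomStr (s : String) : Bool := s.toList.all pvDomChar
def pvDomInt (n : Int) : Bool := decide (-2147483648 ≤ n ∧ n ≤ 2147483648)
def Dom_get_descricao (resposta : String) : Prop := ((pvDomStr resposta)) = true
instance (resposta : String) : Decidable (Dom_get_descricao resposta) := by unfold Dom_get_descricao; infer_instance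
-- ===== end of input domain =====

-- B replaces A's char-by-char break-loop and per-index scan by split('|',1)[0] and a
-- three-chunk slice construction keyed on the break positions (objective: simpler).

-- ===== PORT A =====
-- A's break-loop: copy characters until the first '|'
def prefA : List Char → List Char
  | [] => []
  | c :: rest => if c ≠ '|' then c :: prefA rest else []

-- one iteration of A's for-i-in-range loop (descricao[i] read with getD; i < length always)
def pieceA (d : List Char) (i : Nat) : List Char :=
  if i = 65 ∨ i = 130 ∨ i = 195 then
    if d.getD i ' ' ≠ ' ' then '\n' :: [d.getD i ' '] else ['\n']
  else [d.getD i ' ']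

def formatA (d : List Char) : List Char :=
  (List.range d.length).foldl (fun linha i => linha ++ pieceA d i) []

def get_descricao (resposta : String) : String :=
  String.ofList (formatA (prefA resposta.toList))

-- ===== PORT B =====
-- B's loop over the fixed break positions, building slices (prev is the running chunk start)
def chunksB (d : List Char) (prev : Nat) : List Nat → List Char
  | [] => d.drop prev
  | pos :: rest =>
    if pos < d.length then
      (d.drop prev).take (pos - prev) ++
        '\n' :: chunksB d (if d.getD pos ' ' = ' ' then pos + 1 else pos) rest
    else chunksB d prev rest

def get_descricao_alt (resposta : String) : String :=
  let d := resposta.toList.takeWhile (· ≠ '|')   -- split('|', 1)[0]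
  String.ofList (chunksB d 0 [65, 130, 195])

-- ===== PRECONDITION & SPEC =====
def Spec_get_descricao (resposta : String) (out : String) : Prop := out = get_descricao_alt resposta
instance (resposta : String) (out : String) : Decidable (Spec_get_descricao resposta out) := by unfold Spec_get_descricao; infer_instance

-- ===== CLAIM (what is proved, stated in full; the proofs are below) =====
def Claim_equal_get_descricao : Prop := ∀ (resposta : String), Dom_get_descricao resposta → Spec_get_descricao resposta (get_descricao resposta)

-- ===== LEMMAS AND PROOFS =====

theorem prefA_eq_takeWhile (l : List Char) : prefA l = l.takeWhile (· ≠ '|') := by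
  induction l with
  | nil => rfl
  | cons c rest ih => by_cases h : c = '|' <;> simp [prefA, List.takeWhile, h, ih]

-- a special-free segment [a, a+k) contributes exactly the slice d[a : a+k]
theorem flatMap_seg (d : List Char) (k : Nat) : ∀ (a : Nat), a + k ≤ d.length →
    (∀ i, a ≤ i → i < a + k → ¬(i = 65 ∨ i = 130 ∨ i = 195)) →
    (List.range' a k).flatMap (pieceA d) = (d.drop a).take k := by
  induction k with
  | zero => intro a _ _; simp
  | succ k ih =>
    intro a ha hno
    have hlt : a < d.length := by omega
    have hnsa : ¬(a = 65 ∨ a = 130 ∨ a = 195) := hno a (le_refl a) (by omega)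
    have hdrop : d.drop a = d.getD a ' ' :: d.drop (a + 1) := by
      rw [List.getD_eq_getElem d ' ' hlt]; exact List.drop_eq_getElem_cons hlt
    rw [List.range'_succ, List.flatMap_cons,
      ih (a + 1) (by omega) (fun i h1 h2 => hno i (by omega) (by omega)), hdrop]
    simp [pieceA, hnsa]

theorem chunksB_cons (d : List Char) (pos : Nat) (h : pos < d.length) :
    ∀ (ps : List Nat), (∀ q ∈ ps, pos < q) →
    chunksB d pos ps = d.getD pos ' ' :: chunksB d (pos + 1) ps := by
  have hdrop : d.drop pos = d.getD pos ' ' :: d.drop (pos + 1) := by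
    rw [List.getD_eq_getElem d ' ' h]; exact List.drop_eq_getElem_cons h
  intro ps
  induction ps with
  | nil => intro _; simpa [chunksB] using hdrop
  | cons q rest ih =>
    intro hq
    have hpq : pos < q := hq q (by simp)
    by_cases hql : q < d.length
    · have ht : (d.drop pos).take (q - pos) =
          d.getD pos ' ' :: (d.drop (pos + 1)).take (q - (pos + 1)) := by
        rw [hdrop]
        have hq1 : q - pos = (q - (pos + 1)) + 1 := by omega
        rw [hq1, List.take_succ_cons]
      simp only [chunksB, hql, if_pos, ht]; rfl
    · simp only [chunksB, if_neg hql]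
      exact ih (fun r hr => hq r (List.mem_cons_of_mem _ hr))

-- main invariant: A's per-index flatMap from a to the end equals B's chunk construction,
-- when ps lists exactly the special indices ≥ a, in increasing order
theorem formatA_eq_chunksB (d : List Char) :
    ∀ (ps : List Nat) (a : Nat), a ≤ d.length →
    List.Pairwise (· < ·) ps → (∀ q ∈ ps, a ≤ q) →
    (∀ q ∈ ps, q = 65 ∨ q = 130 ∨ q = 195) →
    (∀ i, a ≤ i → i < d.length → (i = 65 ∨ i = 130 ∨ i = 195) → i ∈ ps) →
    (List.range' a (d.length - a)).flatMap (pieceA d) = chunksB d a ps := by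
  intro ps
  induction ps with
  | nil =>
    intro a hal _ _ _ hall
    rw [flatMap_seg d (d.length - a) a (by omega)
      (fun i h1 h2 hsp => by exact absurd (hall i h1 (by omega) hsp) (by simp)),
      chunksB, List.take_of_length_le (by simp)]
  | cons pos rest ih =>
    intro a hal hpw hge hsp hall
    have hpw' : List.Pairwise (· < ·) rest := hpw.tail
    have hrest_gt : ∀ q ∈ rest, pos < q := fun q hq => (List.pairwise_cons.mp hpw).1 q hq
    have hapos : a ≤ pos := hge pos (by simp)
    by_cases hpl : pos < d.length
    · -- split the index range at pos
      have hsplit : List.range' a (d.length - a) =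
          List.range' a (pos - a) ++ pos :: List.range' (pos + 1) (d.length - (pos + 1)) := by
        have h1 := List.range'_append (s := a) (m := pos - a) (n := d.length - pos) (step := 1)
        rw [show a + 1 * (pos - a) = pos from by omega,
          show pos - a + (d.length - pos) = d.length - a from by omega,
          show d.length - pos = (d.length - (pos + 1)) + 1 from by omega,
          List.range'_succ] at h1
        exact h1.symm
      have hseg : (List.range' a (pos - a)).flatMap (pieceA d) = (d.drop a).take (pos - a) := by
        apply flatMap_seg d (pos - a) a (by omega)
        intro i h1 h2 hspI
        have : i ∈ pos :: rest := hall i h1 (by omega) hspI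
        rcases List.mem_cons.mp this with h | h
        · omega
        · exact absurd (hrest_gt i h) (by omega)
      have hsppos : pos = 65 ∨ pos = 130 ∨ pos = 195 := hsp pos (by simp)
      rw [hsplit, List.flatMap_append, List.flatMap_cons, hseg]
      have hIH : (List.range' (pos + 1) (d.length - (pos + 1))).flatMap (pieceA d) =
          chunksB d (pos + 1) rest := by
        apply ih (pos + 1) (by omega) hpw' (fun q hq => hrest_gt q hq)
          (fun q hq => hsp q (by simp [hq]))
        intro i h1 h2 hspI
        have : i ∈ pos :: rest := hall i (by omega) h2 hspI
        rcases List.mem_cons.mp this with h | h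
        · omega
        · exact h
      by_cases hsp' : d.getD pos ' ' = ' '
      · have hp : pieceA d pos = ['\n'] := by
          rw [pieceA, if_pos hsppos, if_neg (not_not_intro hsp')]
        rw [show chunksB d a (pos :: rest) =
            (d.drop a).take (pos - a) ++ '\n' :: chunksB d (pos + 1) rest from by
          rw [chunksB, if_pos hpl, hsp', if_pos rfl], hp, hIH]
        simp
      · have hp : pieceA d pos = ['\n', d.getD pos ' '] := by
          rw [pieceA, if_pos hsppos, if_pos hsp']
        have hcc : chunksB d pos rest = d.getD pos ' ' :: chunksB d (pos + 1) rest :=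
          chunksB_cons d pos hpl rest hrest_gt
        rw [show chunksB d a (pos :: rest) =
            (d.drop a).take (pos - a) ++ '\n' :: chunksB d pos rest from by
          rw [chunksB, if_pos hpl, if_neg hsp'], hcc, hp, hIH]
        simp
    · -- pos is past the end: B skips it, A never reaches it
      rw [show chunksB d a (pos :: rest) = chunksB d a rest by
        simp [chunksB, if_neg hpl]]
      apply ih a hal hpw' (fun q hq => by have := hrest_gt q hq; omega)
        (fun q hq => hsp q (by simp [hq]))
      intro i h1 h2 hspI
      have : i ∈ pos :: rest := hall i h1 h2 hspI
      rcases List.mem_cons.mp this with h | h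
      · omega
      · exact h

-- ===== VERDICT (by name: the statement is the Claim_ definition above) =====
theorem get_descricao_spec : Claim_equal_get_descricao := by
  intro resposta _
  unfold Spec_get_descricao get_descricao get_descricao_alt
  rw [prefA_eq_takeWhile]
  set d := resposta.toList.takeWhile (· ≠ '|') with hd
  congr 1
  rw [formatA, PySem.List.foldl_append_eq_flatMap, List.nil_append,
    List.range_eq_range']
  have := formatA_eq_chunksB d [65, 130, 195] 0 (by omega) (by decide) (by intro q _; omega)
    (fun q hq => by simpa using hq)
    (fun i _ _ hsp => by rcases hsp with h | h | h <;> simp [h])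
  simpa using this
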